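-- pv_equiv track=rewrite | github.com/mrpiyushhh/WAD | spam.py | spam_filter
-- ===== SOURCE A (Python) =====
-- def spam_filter(email_text):
--     spam_keywords = ['offer', 'discount', 'free', 'prize', 'limited', 'money', 'order']
--     spam_count = sum(email_text.lower().count(keyword) for keyword in spam_keywords)
--     spam_threshold = 3
--
--     if spam_count >= spam_threshold:
--         return True
--     else:
--         return False
-- ===== SOURCE B (Python) =====
-- def spam_filter(email_text):
--     spam_keywords = ['offer', 'discount', 'free', 'prize', 'limited', 'money', 'order']
--     text = email_text.lower()
--     needed = 3
--     i = 0
--     while i < len(text):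
--         for keyword in spam_keywords:
--             if text.startswith(keyword, i):
--                 needed -= 1
--                 if needed == 0:
--                     return True
--         i += 1
--     return False
-- ===== Notes on version B (the rewrite author's own statement) =====
-- stated objective: alternative
-- what changed: Replaces A's sum of seven separate str.count scans followed by a threshold comparison with a single left-to-right scan carrying a countdown of matches still required, decrementing on each keyword match at each position and returning True early once it hits zero; equal because no keyword self-overlaps, so per-position matches total exactly the non-overlapping per-keyword counts.
import Mathlib
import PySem

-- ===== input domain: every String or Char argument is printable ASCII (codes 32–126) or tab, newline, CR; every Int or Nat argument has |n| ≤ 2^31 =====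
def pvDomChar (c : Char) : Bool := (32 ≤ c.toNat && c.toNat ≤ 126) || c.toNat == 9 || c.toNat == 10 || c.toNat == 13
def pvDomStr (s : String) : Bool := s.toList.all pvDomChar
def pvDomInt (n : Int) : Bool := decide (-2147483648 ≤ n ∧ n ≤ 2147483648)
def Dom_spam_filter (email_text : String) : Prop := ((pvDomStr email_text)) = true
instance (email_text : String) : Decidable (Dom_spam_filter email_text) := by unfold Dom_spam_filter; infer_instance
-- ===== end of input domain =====

-- B replaces A's sum-of-seven-count-scans + threshold test by one left-to-right scan with an
-- early-exit countdown of the 3 matches still needed (alternative decomposition, same cost).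

-- ===== PORT A =====
def spam_filter (email_text : String) : Bool :=
  let spam_keywords : List (List Char) :=
    ["offer".toList, "discount".toList, "free".toList, "prize".toList,
     "limited".toList, "money".toList, "order".toList]
  let spam_count : Nat :=
    (spam_keywords.map (fun keyword =>
      PySem.Chars.count (PySem.Chars.lower email_text.toList) keyword)).sum
  if 3 ≤ spam_count then true else false

-- ===== PORT B =====
-- B's inner `for keyword in …` loop at one position: decrement `needed` on each match;
-- `none` means `needed` reached 0 (Python's early `return True`).
def pvInner (pos : List Char) : List (List Char) → Nat → Option Nat
  | [], needed => some needed
  | kw :: ks, needed =>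
    if kw.isPrefixOf pos then
      if needed - 1 = 0 then none else pvInner pos ks (needed - 1)
    else pvInner pos ks needed
-- B's outer `while i < len(text)` loop: text.startswith(keyword, i) with 0 ≤ i is ported
-- by hand as a prefix test on the remaining suffix (exact there); recursion steps i by 1.
def pvScan (kws : List (List Char)) : List Char → Nat → Bool
  | [], _ => false
  | c :: t, needed =>
    match pvInner (c :: t) kws needed with
    | none => true
    | some needed' => pvScan kws t needed'

def spam_filter_alt (email_text : String) : Bool :=
  pvScan ["offer".toList, "discount".toList, "free".toList, "prize".toList,
          "limited".toList, "money".toList, "order".toList]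
    (PySem.Chars.lower email_text.toList) 3

-- ===== PRECONDITION & SPEC =====
def Spec_spam_filter (email_text : String) (out : Bool) : Prop := out = spam_filter_alt email_text
instance (email_text : String) (out : Bool) : Decidable (Spec_spam_filter email_text out) := by unfold Spec_spam_filter; infer_instance

-- ===== CLAIM (what is proved, stated in full; the proofs are below) =====
def Claim_equal_spam_filter : Prop := ∀ (email_text : String), Dom_spam_filter email_text → Spec_spam_filter email_text (spam_filter email_text)

-- ===== LEMMAS AND PROOFS =====

-- k has no nonempty border (no proper self-overlap)
def noSelfOverlap (k : List Char) : Bool :=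
  (List.range k.length).all (fun j => j == 0 || !((k.take (k.length - j)).isPrefixOf (k.drop j)))

theorem no_overlap_of_prefix {k l : List Char} (hb : noSelfOverlap k = true)
    (h : k.isPrefixOf l = true) {j : Nat} (h1 : 0 < j) (h2 : j < k.length) :
    ¬ k.isPrefixOf (l.drop j) = true := by
  intro habs
  obtain ⟨r, rfl⟩ := (PySem.Chars.startswith_iff l k).mp h
  rw [List.drop_append_of_le_length (le_of_lt h2)] at habs
  have hk2 : k = (k.drop j ++ r).take k.length :=
    List.prefix_iff_eq_take.mp ((PySem.Chars.startswith_iff _ k).mp habs)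
  have htk : k.take (k.length - j) = k.drop j := by
    calc k.take (k.length - j) = ((k.drop j ++ r).take k.length).take (k.length - j) := by rw [← hk2]
    _ = (k.drop j ++ r).take (min (k.length - j) k.length) := by rw [List.take_take]
    _ = (k.drop j ++ r).take (k.length - j) := by rw [min_eq_left (Nat.sub_le _ _)]
    _ = (k.drop j ++ r).take (k.drop j).length := by simp
    _ = k.drop j := List.take_left
  have hall := (List.all_eq_true.mp hb) j (List.mem_range.mpr h2)
  rw [htk] at hall
  simp [Nat.pos_iff_ne_zero.mp h1] at hall
  have : (List.drop j k).isPrefixOf (List.drop j k) = true := by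
    exact (PySem.Chars.startswith_iff _ _).mpr (List.prefix_refl _)
  rw [this] at hall
  simp at hall

def cntAll (k : List Char) : List Char → Nat
  | [] => 0
  | c :: t => (if k.isPrefixOf (c :: t) then 1 else 0) + cntAll k t

theorem cntAll_drop_succ {k : List Char} (l : List Char) (j : Nat)
    (h : ¬ k.isPrefixOf (l.drop j) = true) :
    cntAll k (l.drop j) = cntAll k (l.drop (j + 1)) := by
  have hdd : l.drop (j + 1) = (l.drop j).tail := by
    rw [← List.drop_one, List.drop_drop]
  rw [hdd]
  cases hc : l.drop j with
  | nil => simp [cntAll]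
  | cons c t =>
    rw [hc] at h
    simp [cntAll, h]

theorem cntAll_chain {k l : List Char} (hb : noSelfOverlap k = true)
    (h : k.isPrefixOf l = true) :
    ∀ j, 0 < j → j ≤ k.length → cntAll k (l.drop j) = cntAll k (l.drop k.length) := by
  intro j hj hjk
  obtain ⟨d, hd⟩ : ∃ d, k.length = j + d := ⟨k.length - j, by omega⟩
  clear hjk
  induction d generalizing j with
  | zero => rw [hd]; simp
  | succ n ih =>
    have hlt : j < k.length := by omega
    rw [cntAll_drop_succ l j (no_overlap_of_prefix hb h hj hlt)]
    exact ih (j + 1) (by omega) (by omega)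

theorem cntAll_match {k l : List Char} (hk : k ≠ []) (hb : noSelfOverlap k = true)
    (h : k.isPrefixOf l = true) :
    cntAll k l = 1 + cntAll k (l.drop k.length) := by
  cases l with
  | nil =>
    exfalso
    have := (PySem.Chars.startswith_iff _ _).mp h
    simp [List.prefix_nil] at this
    exact hk this
  | cons c t =>
    have h1 : cntAll k (c :: t) = 1 + cntAll k t := by simp [cntAll, h]
    have hkl : 0 < k.length := List.length_pos_of_ne_nil hk
    have hchain := cntAll_chain hb h 1 (by omega) hkl
    simp only [List.drop_one, List.tail_cons] at hchain
    rw [h1, hchain]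

theorem go_eq_cntAll {k : List Char} (hk : k ≠ []) (hb : noSelfOverlap k = true) :
    ∀ (fuel : Nat) (l : List Char) (acc : Nat), l.length ≤ fuel →
      PySem.Chars.count.go k fuel l acc = acc + cntAll k l := by
  intro fuel
  induction fuel with
  | zero =>
    intro l acc hl
    have : l = [] := List.eq_nil_of_length_eq_zero (by omega)
    subst this
    simp [PySem.Chars.count.go, cntAll]
  | succ n ih =>
    intro l acc hl
    cases l with
    | nil => simp [PySem.Chars.count.go, cntAll]
    | cons c t =>
      by_cases hp : k.isPrefixOf (c :: t) = true
      · rw [show PySem.Chars.count.go k (n+1) (c :: t) acc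
            = PySem.Chars.count.go k n (List.drop k.length (c :: t)) (acc + 1) by
          simp [PySem.Chars.count.go, hp]]
        have hkl : 0 < k.length := List.length_pos_of_ne_nil hk
        have hlen : (List.drop k.length (c :: t)).length ≤ n := by
          simp at hl ⊢; omega
        rw [ih _ _ hlen, cntAll_match hk hb hp]
        omega
      · rw [show PySem.Chars.count.go k (n+1) (c :: t) acc
            = PySem.Chars.count.go k n t acc by simp [PySem.Chars.count.go, hp]]
        have hlen : t.length ≤ n := by simp at hl; omega
        rw [ih _ _ hlen]
        simp [cntAll, hp]

theorem count_eq_cntAll {k : List Char} (hk : k ≠ []) (hb : noSelfOverlap k = true)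
    (l : List Char) : PySem.Chars.count l k = cntAll k l := by
  have : k.isEmpty = false := by simp [hk]
  simp [PySem.Chars.count, this]
  simpa using go_eq_cntAll hk hb l.length l 0 (le_refl _)

-- total number of keyword matches over all positions of s
def scanG (g : List Char → Nat) : List Char → Nat
  | [] => 0
  | c :: t => g (c :: t) + scanG g t

theorem sum_cntAll_cons (kws : List (List Char)) (c : Char) (t : List Char) :
    (kws.map (fun k => cntAll k (c :: t))).sum
    = kws.countP (fun kw => kw.isPrefixOf (c :: t)) + (kws.map (fun k => cntAll k t)).sum := by
  induction kws with
  | nil => simp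
  | cons k ks ihk =>
    simp only [List.map_cons, List.sum_cons, List.countP_cons, ihk]
    show (if k.isPrefixOf (c :: t) then 1 else 0) + cntAll k t + _ = _
    by_cases hp : k.isPrefixOf (c :: t) = true <;> simp [hp] <;> omega

theorem sum_cntAll_nil (kws : List (List Char)) :
    (kws.map (fun k => cntAll k [])).sum = 0 := by
  induction kws with
  | nil => simp
  | cons k ks ihk =>
    simp only [List.map_cons, List.sum_cons, ihk]
    rfl

theorem scanG_countP (kws : List (List Char)) :
    ∀ s : List Char,
      scanG (fun X => kws.countP (fun kw => kw.isPrefixOf X)) s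
      = (kws.map (fun k => cntAll k s)).sum := by
  intro s
  induction s with
  | nil => rw [sum_cntAll_nil]; rfl
  | cons c t ih =>
    simp only [scanG, ih, sum_cntAll_cons]

theorem pvInner_spec (pos : List Char) (kws : List (List Char)) :
    ∀ n : Nat, 1 ≤ n →
      pvInner pos kws n =
        if kws.countP (fun kw => kw.isPrefixOf pos) < n
        then some (n - kws.countP (fun kw => kw.isPrefixOf pos)) else none := by
  induction kws with
  | nil => intro n hn; simp [pvInner]; omega
  | cons kw ks ih =>
    intro n hn
    simp only [pvInner, List.countP_cons]
    by_cases hp : kw.isPrefixOf pos = true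
    · simp only [hp, if_true]
      by_cases h1 : n - 1 = 0
      · have hn1 : n = 1 := by omega
        subst hn1
        simp
      · rw [if_neg h1, ih (n - 1) (by omega)]
        split_ifs with ha hb hb <;> first | (congr 1; omega) | rfl
    · simp only [hp]
      rw [ih n hn]
      simp

theorem pvScan_spec (kws : List (List Char)) :
    ∀ (l : List Char) (n : Nat), 1 ≤ n →
      pvScan kws l n
      = decide (n ≤ scanG (fun X => kws.countP (fun kw => kw.isPrefixOf X)) l) := by
  intro l
  induction l with
  | nil =>
    intro n hn
    simp [pvScan, scanG]
    omega
  | cons c t ih =>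
    intro n hn
    rw [show pvScan kws (c :: t) n
        = match pvInner (c :: t) kws n with
          | none => true
          | some needed' => pvScan kws t needed' from rfl]
    rw [pvInner_spec (c :: t) kws n hn]
    by_cases hlt : kws.countP (fun kw => kw.isPrefixOf (c :: t)) < n
    · rw [if_pos hlt]
      rw [show (match (some (n - kws.countP fun kw => kw.isPrefixOf (c :: t)) : Option Nat) with
            | none => true
            | some needed' => pvScan kws t needed')
          = pvScan kws t (n - kws.countP fun kw => kw.isPrefixOf (c :: t)) from rfl]
      rw [ih _ (by omega)]
      simp only [scanG, decide_eq_decide]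
      omega
    · rw [if_neg hlt]
      simp only [scanG]
      symm
      rw [decide_eq_true_iff]
      omega

-- ===== VERDICT (by name: the statement is the Claim_ definition above) =====
theorem spam_filter_spec : Claim_equal_spam_filter := by
  intro s _
  unfold Spec_spam_filter
  simp only [spam_filter, spam_filter_alt]
  rw [pvScan_spec _ (PySem.Chars.lower s.toList) 3 (by omega)]
  rw [scanG_countP]
  have hmap : (["offer".toList, "discount".toList, "free".toList, "prize".toList,
      "limited".toList, "money".toList, "order".toList].map
        (fun keyword => PySem.Chars.count (PySem.Chars.lower s.toList) keyword))
      = (["offer".toList, "discount".toList, "free".toList, "prize".toList,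
      "limited".toList, "money".toList, "order".toList].map
        (fun k => cntAll k (PySem.Chars.lower s.toList))) := by
    apply List.map_congr_left
    intro k hk
    fin_cases hk <;> exact count_eq_cntAll (by decide) (by decide) _
  rw [hmap]
  split_ifs with h
  · symm; rw [decide_eq_true_iff]; exact h
  · symm; rw [decide_eq_false_iff_not]; exact h
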